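-- pv_equiv track=rewrite | github.com/lualtek/ui | merge-oxlint.py | merge_and_group
-- ===== SOURCE A (Python) =====
-- def merge_and_group(our_rules, migrated_rules):
--     """Merge rules: our takes precedence, add new ones from migrated, then group by prefix"""
--     merged = dict(our_rules)
--
--     # Add new rules from migrated
--     for key, value in migrated_rules.items():
--         if key not in merged:
--             merged[key] = value
--
--     # Group by prefix
--     groups = {}
--     for key, value in merged.items():
--         if '/' in key:
--             group = key.split('/')[0]
--         else:
--             group = '__eslint-core'
--
--         if group not in groups:
--             groups[group] = {}
--         groups[group][key] = value
--
--     # Order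
--     group_order = ['__eslint-core', 'import', '@stylistic', 'typescript', 'react', 'jsx-a11y', 'unicorn', 'promise', 'node', 'storybook']
--
--     result = {}
--     for group in group_order:
--         if group in groups:
--             for key in sorted(groups[group].keys()):
--                 result[key] = groups[group][key]
--
--     # Add remaining groups
--     for group in sorted(groups.keys()):
--         if group not in group_order:
--             for key in sorted(groups[group].keys()):
--                 result[key] = groups[group][key]
--
--     return result
-- ===== SOURCE B (Python) =====
-- def merge_and_group(our_rules, migrated_rules):
--     """Merge rules (ours win), then emit all rules in one composite-key sort:
--     known groups by their position in group_order, unknown groups after them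
--     sorted by (group, key)."""
--     merged = dict(our_rules)
--     for key, value in migrated_rules.items():
--         merged.setdefault(key, value)
--
--     group_order = ['__eslint-core', 'import', '@stylistic', 'typescript', 'react', 'jsx-a11y', 'unicorn', 'promise', 'node', 'storybook']
--     rank = {group: i for i, group in enumerate(group_order)}
--
--     def sort_key(key):
--         group = key.split('/')[0] if '/' in key else '__eslint-core'
--         return (rank.get(group, len(group_order)), group, key)
--
--     return {key: merged[key] for key in sorted(merged, key=sort_key)}
-- ===== Notes on version B (the rewrite author's own statement) =====
-- stated objective: simpler
-- what changed: Replaces the dict-of-dicts grouping plus two per-group emission loops by a rank map and a single sort of all merged keys under a composite key (group rank, group, key), then one dict comprehension.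
import Mathlib
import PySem

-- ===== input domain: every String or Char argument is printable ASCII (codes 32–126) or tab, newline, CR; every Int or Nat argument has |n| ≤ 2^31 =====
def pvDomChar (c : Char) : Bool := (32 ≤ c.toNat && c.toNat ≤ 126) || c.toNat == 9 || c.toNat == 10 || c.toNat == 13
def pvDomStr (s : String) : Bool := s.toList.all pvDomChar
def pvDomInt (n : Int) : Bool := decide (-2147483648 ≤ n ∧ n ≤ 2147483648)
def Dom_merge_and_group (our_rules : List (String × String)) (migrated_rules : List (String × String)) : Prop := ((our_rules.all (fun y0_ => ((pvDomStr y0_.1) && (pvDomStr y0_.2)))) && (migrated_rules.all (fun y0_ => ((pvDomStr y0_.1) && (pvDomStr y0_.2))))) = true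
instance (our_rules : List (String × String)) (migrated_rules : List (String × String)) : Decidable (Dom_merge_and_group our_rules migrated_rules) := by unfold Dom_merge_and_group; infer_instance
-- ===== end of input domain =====

-- B replaces A's dict-of-dicts grouping and two per-group emission loops by one
-- composite-key sort of all merged keys (objective: simpler, same output).


-- ===== PORT A =====
-- group_order, shared constant of both sources
def pvGroupOrder : List String :=
  ["__eslint-core", "import", "@stylistic", "typescript", "react", "jsx-a11y",
   "unicorn", "promise", "node", "storybook"]

-- "key.split('/')[0] if '/' in key else '__eslint-core'" — the same expression occurs
-- in both A and B; split never returns [], so the [0] access is exact via headD.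
def pvGrp (k : String) : String :=
  if PySem.Str.isIn "/" k then ((PySem.Str.split? k "/").getD []).headD "" else "__eslint-core"

def merge_and_group (our_rules : List (String × String)) (migrated_rules : List (String × String)) : List (String × String) :=
  -- merged = dict(our_rules); for key, value in migrated_rules.items(): if key not in merged: merged[key] = value
  let merged := (PySem.Dict.ofList migrated_rules).items.foldl
      (fun m kv => if m.contains kv.1 then m else m.insert kv.1 kv.2)
      (PySem.Dict.ofList our_rules)
  -- groups: dict of dicts, grouped by prefix
  let groups := merged.items.foldl
      (fun gs kv =>
        let g := pvGrp kv.1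
        let gs := if gs.contains g then gs else gs.insert g PySem.Dict.empty
        gs.modify g PySem.Dict.empty (fun sub => sub.insert kv.1 kv.2))
      PySem.Dict.empty
  -- result: ordered groups first (keys always present, so getD's defaults are never read)
  let result := pvGroupOrder.foldl
      (fun r g =>
        if groups.contains g then
          (PySem.List.sorted (groups.getD g PySem.Dict.empty).keys (fun k => k)).foldl
            (fun r k => r.insert k ((groups.getD g PySem.Dict.empty).getD k "")) r
        else r)
      PySem.Dict.empty
  -- then remaining groups, sorted by name
  let result := (PySem.List.sorted groups.keys (fun k => k)).foldl
      (fun r g =>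
        if pvGroupOrder.contains g = false then
          (PySem.List.sorted (groups.getD g PySem.Dict.empty).keys (fun k => k)).foldl
            (fun r k => r.insert k ((groups.getD g PySem.Dict.empty).getD k "")) r
        else r)
      result
  result.items

-- ===== PORT B =====
-- rank = {group: i for i, group in enumerate(group_order)}
def pvRank : PySem.Dict String Int :=
  (PySem.List.enumerate pvGroupOrder).foldl (fun d p => d.insert p.2 p.1) PySem.Dict.empty

-- sort_key(key) = (rank.get(group, len(group_order)), group, key); the Python 3-tuple is
-- ported as a lexicographic pair (first component, then (group, key) lexicographically),
-- which is exactly Python's tuple comparison.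
def pvSortKey1 (k : String) : Int := pvRank.getD (pvGrp k) (pvGroupOrder.length : Int)
def pvSortKey2 (k : String) : Lex (String × String) := toLex (pvGrp k, k)

def merge_and_group_alt (our_rules : List (String × String)) (migrated_rules : List (String × String)) : List (String × String) :=
  -- merged = dict(our_rules); for key, value in migrated_rules.items(): merged.setdefault(key, value)
  let merged := (PySem.Dict.ofList migrated_rules).items.foldl
      (fun m kv => m.setdefault kv.1 kv.2)
      (PySem.Dict.ofList our_rules)
  -- {key: merged[key] for key in sorted(merged, key=sort_key)}; every key is in merged,
  -- so the getD default is never read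
  let skeys := PySem.List.sorted2 merged.keys pvSortKey1 pvSortKey2
  (skeys.foldl (fun r k => r.insert k (merged.getD k "")) PySem.Dict.empty).items

-- ===== PRECONDITION & SPEC =====
def Spec_merge_and_group (our_rules : List (String × String)) (migrated_rules : List (String × String)) (out : List (String × String)) : Prop := out = merge_and_group_alt our_rules migrated_rules
instance (our_rules : List (String × String)) (migrated_rules : List (String × String)) (out : List (String × String)) : Decidable (Spec_merge_and_group our_rules migrated_rules out) := by unfold Spec_merge_and_group; infer_instance

-- ===== CLAIM (what is proved, stated in full; the proofs are below) =====
def Claim_equal_merge_and_group : Prop := ∀ (our_rules : List (String × String)) (migrated_rules : List (String × String)), Dom_merge_and_group our_rules migrated_rules → Spec_merge_and_group our_rules migrated_rules (merge_and_group our_rules migrated_rules)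

-- ===== LEMMAS AND PROOFS =====

-- Abbreviations used only by the proofs
def pvMerge (our_rules migrated_rules : List (String × String)) : PySem.Dict String String :=
  (PySem.Dict.ofList migrated_rules).items.foldl
    (fun m kv => if m.contains kv.1 then m else m.insert kv.1 kv.2)
    (PySem.Dict.ofList our_rules)

def pvGStep : PySem.Dict String (PySem.Dict String String) → String × String → PySem.Dict String (PySem.Dict String String) :=
  fun gs kv =>
    (if gs.contains (pvGrp kv.1) then gs else gs.insert (pvGrp kv.1) PySem.Dict.empty).modify
      (pvGrp kv.1) PySem.Dict.empty (fun sub => sub.insert kv.1 kv.2)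

def pvKey (k : String) : Lex (Int × Lex (String × String)) := toLex (pvSortKey1 k, pvSortKey2 k)

-- B's merge loop is A's merge loop
lemma pv_setdefault_eq (d : PySem.Dict String String) (k v : String) :
    d.setdefault k v = if d.contains k then d else d.insert k v := by
  cases h : d.contains k with
  | true => simp [PySem.Dict.setdefault_of_contains _ _ h]
  | false => simp [PySem.Dict.setdefault_of_not_contains _ _ h]

lemma pv_mergeB_eq (our migrated : List (String × String)) :
    (PySem.Dict.ofList migrated).items.foldl (fun m kv => m.setdefault kv.1 kv.2)
      (PySem.Dict.ofList our) = pvMerge our migrated := by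
  unfold pvMerge
  congr 1
  funext m kv
  exact pv_setdefault_eq m kv.1 kv.2

-- merged has Nodup keys
lemma pv_merge_step_nodup (l : List (String × String)) (d : PySem.Dict String String)
    (h : d.keys.Nodup) :
    (l.foldl (fun m kv => if m.contains kv.1 then m else m.insert kv.1 kv.2) d).keys.Nodup := by
  induction l generalizing d with
  | nil => exact h
  | cons kv t ih =>
    simp only [List.foldl_cons]
    apply ih
    cases hc : d.contains kv.1 with
    | true => rw [if_pos rfl]; exact h
    | false =>
      rw [if_neg (by simp)]
      rw [PySem.Dict.keys_insert_of_not_contains _ _ hc]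
      refine List.Nodup.append h (by simp) ?_
      intro a ha hb
      simp at hb
      subst hb
      rw [PySem.Dict.contains_eq_decide_mem_keys] at hc
      simp at hc
      exact hc ha

lemma pv_merge_nodup (our migrated : List (String × String)) :
    (pvMerge our migrated).keys.Nodup :=
  pv_merge_step_nodup _ _ (PySem.Dict.nodup_keys_ofList our)

-- step facts for the grouping loop
lemma pvGStep_keys (gs : PySem.Dict String (PySem.Dict String String)) (kv : String × String) :
    (pvGStep gs kv).keys = PySem.Set.add gs.keys (pvGrp kv.1) := by
  unfold pvGStep
  cases hc : gs.contains (pvGrp kv.1) with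
  | true =>
    rw [if_pos rfl, PySem.Dict.keys_modify, PySem.Dict.keys_insert_of_contains _ _ hc]
    have hm : pvGrp kv.1 ∈ gs.keys := by
      rw [PySem.Dict.contains_eq_decide_mem_keys] at hc
      simpa using hc
    simp [PySem.Set.add, hm]
  | false =>
    rw [if_neg (by simp), PySem.Dict.keys_modify,
        PySem.Dict.keys_insert_of_contains _ _ (PySem.Dict.contains_insert_self _ _ _),
        PySem.Dict.keys_insert_of_not_contains _ _ hc]
    have hm : pvGrp kv.1 ∉ gs.keys := by
      rw [PySem.Dict.contains_eq_decide_mem_keys] at hc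
      simpa using hc
    simp [PySem.Set.add, hm]

lemma pvGStep_getD (gs : PySem.Dict String (PySem.Dict String String)) (kv : String × String) (g : String) :
    (pvGStep gs kv).getD g PySem.Dict.empty
      = if pvGrp kv.1 == g then (gs.getD g PySem.Dict.empty).insert kv.1 kv.2
        else gs.getD g PySem.Dict.empty := by
  unfold pvGStep
  cases hc : gs.contains (pvGrp kv.1) with
  | true =>
    rw [if_pos rfl]
    by_cases hg : pvGrp kv.1 = g
    · subst hg; rw [PySem.Dict.getD_modify_self, if_pos (by simp)]
    · rw [PySem.Dict.getD_modify_of_ne _ _ _ (fun h => hg h.symm), if_neg (by simpa using hg)]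
  | false =>
    rw [if_neg (by simp)]
    by_cases hg : pvGrp kv.1 = g
    · subst hg
      rw [PySem.Dict.getD_modify_self, PySem.Dict.getD_insert_self, if_pos (by simp),
          PySem.Dict.getD_of_not_contains _ _ hc]
    · rw [PySem.Dict.getD_modify_of_ne _ _ _ (fun h => hg h.symm),
          PySem.Dict.getD_insert_of_ne _ _ _ (fun h => hg h.symm), if_neg (by simpa using hg)]

-- groups characterization: keys
lemma pv_groups_keys (l : List (String × String)) (d : PySem.Dict String (PySem.Dict String String)) :
    (l.foldl pvGStep d).keys = PySem.Set.update d.keys (l.map (fun kv => pvGrp kv.1)) := by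
  induction l generalizing d with
  | nil => simp [PySem.Set.update]
  | cons kv t ih =>
    simp only [List.foldl_cons, List.map_cons]
    rw [ih, pvGStep_keys]
    rfl

-- groups characterization: each bucket
lemma pv_groups_getD (l : List (String × String)) (d : PySem.Dict String (PySem.Dict String String)) (g : String) :
    (l.foldl pvGStep d).getD g PySem.Dict.empty
      = (l.filter (fun kv => pvGrp kv.1 == g)).foldl (fun s kv => s.insert kv.1 kv.2)
          (d.getD g PySem.Dict.empty) := by
  induction l generalizing d with
  | nil => simp
  | cons kv t ih =>
    simp only [List.foldl_cons, List.filter_cons]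
    rw [ih, pvGStep_getD]
    cases hb : (pvGrp kv.1 == g) with
    | true => simp
    | false => simp

-- partition: flatMap of the fibers of f over a covering Nodup list of groups is a permutation
lemma pv_partition_perm (f : String → String) (gl : List String) (K : List String)
    (hn : gl.Nodup) (hc : ∀ k ∈ K, f k ∈ gl) :
    (gl.flatMap (fun g => K.filter (fun k => f k == g))).Perm K := by
  induction gl generalizing K with
  | nil =>
    cases K with
    | nil => simp
    | cons k t => exact absurd (hc k (by simp)) (by simp)
  | cons g t ih =>
    simp only [List.flatMap_cons]
    have hgt : g ∉ t := (List.nodup_cons.1 hn).1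
    have hrest : t.flatMap (fun g' => K.filter (fun k => f k == g'))
        = t.flatMap (fun g' => (K.filter (fun k => !(f k == g))).filter (fun k => f k == g')) := by
      apply List.flatMap_congr
      intro g' hg'
      rw [List.filter_filter]
      apply List.filter_congr
      intro k _
      cases hk : (f k == g') with
      | true =>
        have hfk : f k = g' := by simpa using hk
        have hne : (f k == g) = false := by
          simp only [beq_eq_false_iff_ne, ne_eq, hfk]
          intro h; exact hgt (h ▸ hg')
        simp [hne]
      | false => simp
    rw [hrest]
    have hK' : ∀ k ∈ K.filter (fun k => !(f k == g)), f k ∈ t := by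
      intro k hk
      rcases List.mem_filter.1 hk with ⟨hkK, hne⟩
      rcases List.mem_cons.1 (hc k hkK) with h | h
      · simp [h] at hne
      · exact h
    have hperm := ih (K.filter (fun k => !(f k == g))) (List.nodup_cons.1 hn).2 hK'
    exact (List.Perm.append_left _ hperm).trans (List.filter_append_perm _ K)

-- flatMap respects pointwise Perm
lemma pv_flatMap_perm_congr {α β : Type} (gl : List α) (f h : α → List β)
    (hp : ∀ g ∈ gl, (f g).Perm (h g)) : (gl.flatMap f).Perm (gl.flatMap h) := by
  induction gl with
  | nil => simp
  | cons g t ih =>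
    simp only [List.flatMap_cons]
    exact (hp g (by simp)).append (ih (fun x hx => hp x (by simp [hx])))

-- sorted2 is sorted under the lexicographic pair key
lemma pv_sorted2_eq_sorted {α κ₁ κ₂ : Type} [LinearOrder κ₁] [LinearOrder κ₂]
    (xs : List α) (k1 : α → κ₁) (k2 : α → κ₂) :
    PySem.List.sorted2 xs k1 k2 = PySem.List.sorted xs (fun x => toLex (k1 x, k2 x)) := by
  show List.foldl (fun acc x => PySem.List.insertBy
      (fun a b => decide (k1 a < k1 b) || (!decide (k1 b < k1 a) && decide (k2 a < k2 b))) x acc) [] xs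
    = List.foldl (fun acc x => PySem.List.insertBy
      (fun a b => decide (toLex (k1 a, k2 a) < toLex (k1 b, k2 b))) x acc) [] xs
  have hb : (fun (a b : α) => decide (k1 a < k1 b) || (!decide (k1 b < k1 a) && decide (k2 a < k2 b)))
      = fun a b => decide (toLex (k1 a, k2 a) < toLex (k1 b, k2 b)) := by
    funext a b
    rcases lt_trichotomy (k1 a) (k1 b) with h | h | h
    · simp [Prod.Lex.toLex_lt_toLex, h]
    · simp [Prod.Lex.toLex_lt_toLex, h]
    · simp [Prod.Lex.toLex_lt_toLex, h, not_lt_of_gt h, ne_of_gt h]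
  rw [hb]



-- named pieces of A's emission
def pvGroups (our migrated : List (String × String)) : PySem.Dict String (PySem.Dict String String) :=
  (pvMerge our migrated).items.foldl pvGStep PySem.Dict.empty

def pvBucketL (our migrated : List (String × String)) (g : String) : List String :=
  PySem.List.sorted ((pvMerge our migrated).keys.filter (fun k => pvGrp k == g)) (fun k => k)

def pvGL (our migrated : List (String × String)) : List String :=
  pvGroupOrder.filter (fun g => (pvGroups our migrated).contains g)
    ++ (PySem.List.sorted (pvGroups our migrated).keys (fun k => k)).filter
        (fun g => decide (pvGroupOrder.contains g = false))

def pvL (our migrated : List (String × String)) : List String :=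
  (pvGL our migrated).flatMap (pvBucketL our migrated)

-- the inner dict of group g
lemma pv_groups_bucket (our migrated : List (String × String)) (g : String) :
    (pvGroups our migrated).getD g PySem.Dict.empty
      = ((pvMerge our migrated).items.filter (fun kv => pvGrp kv.1 == g)).foldl
          (fun s kv => s.insert kv.1 kv.2) PySem.Dict.empty := by
  unfold pvGroups
  rw [pv_groups_getD]
  simp [PySem.Dict.getD_empty]

-- a dict built from distinct-key pairs has exactly those items
lemma pv_dict_ofPairs_items (J : List (String × String))
    (hnd : (J.map (fun kv => kv.1)).Nodup) :
    (J.foldl (fun s kv => s.insert kv.1 kv.2)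
        (PySem.Dict.empty : PySem.Dict String String)).items = J := by
  have h2 := PySem.Dict.items_foldl_insert_fresh J (fun kv => kv.1) (fun kv => kv.2)
      PySem.Dict.empty (fun a _ => PySem.Dict.contains_empty _) hnd
  simpa using h2

lemma pv_bucket_items (our migrated : List (String × String)) (g : String) :
    ((pvGroups our migrated).getD g PySem.Dict.empty).items
      = (pvMerge our migrated).items.filter (fun kv => pvGrp kv.1 == g) := by
  have hm := pv_merge_nodup our migrated
  simp only [PySem.Dict.keys] at hm
  rw [pv_groups_bucket]
  exact pv_dict_ofPairs_items _
    ((List.Sublist.map (fun (kv : String × String) => kv.1) List.filter_sublist).nodup hm)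

lemma pv_bucket_keys (our migrated : List (String × String)) (g : String) :
    ((pvGroups our migrated).getD g PySem.Dict.empty).keys
      = (pvMerge our migrated).keys.filter (fun k => pvGrp k == g) := by
  simp only [PySem.Dict.keys, pv_bucket_items]
  rw [List.filter_map]
  rfl

lemma pv_bucket_getD (our migrated : List (String × String)) (g k : String)
    (hk : k ∈ ((pvGroups our migrated).getD g PySem.Dict.empty).keys) :
    ((pvGroups our migrated).getD g PySem.Dict.empty).getD k ""
      = (pvMerge our migrated).getD k "" := by
  have hm := pv_merge_nodup our migrated
  have hbk : ((pvGroups our migrated).getD g PySem.Dict.empty).keys.Nodup := by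
    rw [pv_bucket_keys]; exact hm.filter _
  simp only [PySem.Dict.keys, pv_bucket_items] at hk
  rcases List.mem_map.1 hk with ⟨kv, hkv, hfst⟩
  have hkv' : kv ∈ (pvMerge our migrated).items := (List.mem_filter.1 hkv).1
  have h1 : ((pvGroups our migrated).getD g PySem.Dict.empty).getD kv.1 "" = kv.2 := by
    have hmem : (kv.1, kv.2) ∈ ((pvGroups our migrated).getD g PySem.Dict.empty).items := by
      rw [pv_bucket_items]; simpa using hkv
    exact PySem.Dict.getD_of_mem_items _ hmem hbk ""
  have h2 : (pvMerge our migrated).getD kv.1 "" = kv.2 :=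
    PySem.Dict.getD_of_mem_items _ (by simpa using hkv') hm ""
  rw [← hfst, h1, h2]

-- A's result is the flat emission list, folded into a dict
lemma pv_A_foldl (our migrated : List (String × String)) :
    merge_and_group our migrated
      = ((pvL our migrated).foldl
          (fun r k => r.insert k ((pvMerge our migrated).getD k "")) PySem.Dict.empty).items := by
  show ((PySem.List.sorted (pvGroups our migrated).keys (fun k => k)).foldl
      (fun r g =>
        if pvGroupOrder.contains g = false then
          (PySem.List.sorted ((pvGroups our migrated).getD g PySem.Dict.empty).keys (fun k => k)).foldl
            (fun r k => r.insert k (((pvGroups our migrated).getD g PySem.Dict.empty).getD k "")) r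
        else r)
      (pvGroupOrder.foldl
        (fun r g =>
          if (pvGroups our migrated).contains g then
            (PySem.List.sorted ((pvGroups our migrated).getD g PySem.Dict.empty).keys (fun k => k)).foldl
              (fun r k => r.insert k (((pvGroups our migrated).getD g PySem.Dict.empty).getD k "")) r
          else r)
        PySem.Dict.empty)).items = _
  have hE : ∀ (g : String) (r : PySem.Dict String String),
      (PySem.List.sorted ((pvGroups our migrated).getD g PySem.Dict.empty).keys (fun k => k)).foldl
          (fun r k => r.insert k (((pvGroups our migrated).getD g PySem.Dict.empty).getD k "")) r
        = (pvBucketL our migrated g).foldl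
            (fun r k => r.insert k ((pvMerge our migrated).getD k "")) r := by
    intro g r
    rw [PySem.List.foldl_congr_mem _ _
          (fun r k => r.insert k ((pvMerge our migrated).getD k "")) r ?hcg]
    · unfold pvBucketL; rw [pv_bucket_keys]
    case hcg =>
      intro acc k hk
      rw [pv_bucket_getD our migrated g k (by rwa [← PySem.List.mem_sorted _ (fun k => k) false])]
  simp only [hE]
  rw [PySem.List.foldl_ite_eq_foldl_filter, PySem.List.foldl_if_eq_foldl_filter]
  rw [← List.foldl_flatMap, ← List.foldl_flatMap, ← List.foldl_append, ← List.flatMap_append]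
  rfl

-- B's result is the sorted key list, folded into a dict
lemma pv_B_foldl (our migrated : List (String × String)) :
    merge_and_group_alt our migrated
      = ((PySem.List.sorted2 (pvMerge our migrated).keys pvSortKey1 pvSortKey2).foldl
          (fun r k => r.insert k ((pvMerge our migrated).getD k "")) PySem.Dict.empty).items := by
  unfold merge_and_group_alt
  rw [pv_mergeB_eq]

-- the group list of A's emission is Nodup
lemma pv_GL_nodup (our migrated : List (String × String)) : (pvGL our migrated).Nodup := by
  have hGK : (pvGroups our migrated).keys.Nodup := by
    unfold pvGroups
    rw [pv_groups_keys]
    have : PySem.Set.update ([] : List String)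
        ((pvMerge our migrated).items.map (fun kv => pvGrp kv.1))
        = PySem.Set.ofList ((pvMerge our migrated).items.map (fun kv => pvGrp kv.1)) := rfl
    rw [PySem.Dict.keys_empty, this]
    exact PySem.Set.nodup_ofList _
  apply List.Nodup.append
  · exact (by decide : pvGroupOrder.Nodup).filter _
  · exact ((PySem.List.sorted_perm _ _ _).symm.nodup hGK).filter _
  · intro a ha hb
    have h1 : a ∈ pvGroupOrder := (List.mem_filter.1 ha).1
    have h2 : pvGroupOrder.contains a = false := of_decide_eq_true (List.mem_filter.1 hb).2
    rw [← List.contains_iff_mem, h2] at h1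
    exact Bool.false_ne_true h1

-- every merged key's group occurs in A's group list
lemma pv_GL_covers (our migrated : List (String × String)) :
    ∀ k ∈ (pvMerge our migrated).keys, pvGrp k ∈ pvGL our migrated := by
  intro k hk
  have hGK : pvGrp k ∈ (pvGroups our migrated).keys := by
    unfold pvGroups
    rw [pv_groups_keys, PySem.Dict.keys_empty]
    rw [show PySem.Set.update ([] : List String)
        ((pvMerge our migrated).items.map (fun kv => pvGrp kv.1))
        = PySem.Set.ofList ((pvMerge our migrated).items.map (fun kv => pvGrp kv.1)) from rfl]
    rw [PySem.Set.mem_ofList]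
    simp only [PySem.Dict.keys] at hk
    rcases List.mem_map.1 hk with ⟨kv, hkv, rfl⟩
    exact List.mem_map.2 ⟨kv, hkv, rfl⟩
  by_cases hgo : pvGrp k ∈ pvGroupOrder
  · apply List.mem_append_left
    refine List.mem_filter.2 ⟨hgo, ?_⟩
    rw [PySem.Dict.contains_eq_decide_mem_keys]
    simpa using hGK
  · apply List.mem_append_right
    refine List.mem_filter.2 ⟨?_, ?_⟩
    · rw [PySem.List.mem_sorted]; exact hGK
    · simp only [decide_eq_true_eq]
      cases h : pvGroupOrder.contains (pvGrp k)
      · rfl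
      · exact absurd (List.contains_iff_mem.1 h) hgo

-- A's emission list is a permutation of the merged keys
lemma pv_L_perm (our migrated : List (String × String)) :
    (pvL our migrated).Perm (pvMerge our migrated).keys := by
  unfold pvL
  have h1 : ((pvGL our migrated).flatMap (pvBucketL our migrated)).Perm
      ((pvGL our migrated).flatMap (fun g => (pvMerge our migrated).keys.filter (fun k => pvGrp k == g))) :=
    pv_flatMap_perm_congr _ _ _ (fun g _ => PySem.List.sorted_perm _ _ _)
  exact h1.trans (pv_partition_perm pvGrp _ _ (pv_GL_nodup our migrated) (pv_GL_covers our migrated))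

-- rank bookkeeping (finite checks on the literal rank dict)
lemma pv_rank_keys : pvRank.keys = pvGroupOrder := by decide

lemma pv_rank_out (g : String) (hg : g ∉ pvGroupOrder) :
    pvRank.getD g (pvGroupOrder.length : Int) = (pvGroupOrder.length : Int) := by
  apply PySem.Dict.getD_of_not_contains
  rw [PySem.Dict.contains_eq_decide_mem_keys, pv_rank_keys]
  simpa using hg

lemma pv_rank_in : ∀ g ∈ pvGroupOrder,
    pvRank.getD g (pvGroupOrder.length : Int) < (pvGroupOrder.length : Int) := by decide

lemma pv_rank_mono : pvGroupOrder.Pairwise (fun g g' =>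
    pvRank.getD g (pvGroupOrder.length : Int) < pvRank.getD g' (pvGroupOrder.length : Int)) := by
  decide

-- members of a bucket have that group
lemma pv_bucketL_grp (our migrated : List (String × String)) (g k : String)
    (hk : k ∈ pvBucketL our migrated g) : pvGrp k = g := by
  unfold pvBucketL at hk
  rw [PySem.List.mem_sorted] at hk
  simpa using (List.mem_filter.1 hk).2

-- A's emission list is strictly increasing under B's sort key
lemma pv_L_pairwise (our migrated : List (String × String)) :
    (pvL our migrated).Pairwise (fun a b => pvKey a < pvKey b) := by
  unfold pvL
  rw [List.pairwise_flatMap]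
  constructor
  · -- within one bucket
    intro g _
    have hm := pv_merge_nodup our migrated
    have hnd : (pvBucketL our migrated g).Nodup :=
      (PySem.List.sorted_perm _ _ _).symm.nodup (hm.filter _)
    have hle := PySem.List.sorted_pairwise
        ((pvMerge our migrated).keys.filter (fun k => pvGrp k == g)) (fun k => k)
    refine ((hle.and hnd).imp_of_mem ?_)
    intro a b ha hb hab
    have hga : pvGrp a = g := pv_bucketL_grp our migrated g a ha
    have hgb : pvGrp b = g := pv_bucketL_grp our migrated g b hb
    have hlt : a < b := lt_of_le_of_ne hab.1 hab.2
    unfold pvKey pvSortKey1 pvSortKey2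
    rw [Prod.Lex.toLex_lt_toLex]
    right
    refine ⟨by rw [hga, hgb], ?_⟩
    rw [Prod.Lex.toLex_lt_toLex]
    right
    exact ⟨by rw [hga, hgb], hlt⟩
  · -- across buckets
    have hRg : (pvGL our migrated).Pairwise (fun g g' =>
        pvRank.getD g (pvGroupOrder.length : Int) < pvRank.getD g' (pvGroupOrder.length : Int)
          ∨ (pvRank.getD g (pvGroupOrder.length : Int) = pvRank.getD g' (pvGroupOrder.length : Int)
              ∧ g < g')) := by
      unfold pvGL
      rw [List.pairwise_append]
      refine ⟨(pv_rank_mono.filter _).imp (fun h => Or.inl h), ?_, ?_⟩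
      · -- second part: unknown groups, sorted strictly by name
        have hGK : (pvGroups our migrated).keys.Nodup := by
          unfold pvGroups
          rw [pv_groups_keys, PySem.Dict.keys_empty]
          exact PySem.Set.nodup_ofList _
        have hle := PySem.List.sorted_pairwise (pvGroups our migrated).keys (fun k => k)
        have hnd : (PySem.List.sorted (pvGroups our migrated).keys (fun k => k)).Nodup :=
          (PySem.List.sorted_perm _ _ _).symm.nodup hGK
        refine (((hle.and hnd).filter _).imp_of_mem ?_)
        intro g g' hg hg' h
        have hout : ∀ x, x ∈ (PySem.List.sorted (pvGroups our migrated).keys (fun k => k)).filter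
            (fun g => decide (pvGroupOrder.contains g = false)) → x ∉ pvGroupOrder := by
          intro x hx hmem
          have hc := of_decide_eq_true (List.mem_filter.1 hx).2
          rw [← List.contains_iff_mem, hc] at hmem
          exact Bool.false_ne_true hmem
        right
        exact ⟨by rw [pv_rank_out _ (hout _ hg), pv_rank_out _ (hout _ hg')],
               lt_of_le_of_ne h.1 h.2⟩
      · -- known group before unknown group
        intro a ha b hb
        left
        have h1 : a ∈ pvGroupOrder := (List.mem_filter.1 ha).1
        have h2 : b ∉ pvGroupOrder := by
          intro hmem
          have hc := of_decide_eq_true (List.mem_filter.1 hb).2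
          rw [← List.contains_iff_mem, hc] at hmem
          exact Bool.false_ne_true hmem
        rw [pv_rank_out _ h2]
        exact pv_rank_in a h1
    refine hRg.imp_of_mem ?_
    intro g g' _ _ h a ha b hb
    have hga : pvGrp a = g := pv_bucketL_grp our migrated g a ha
    have hgb : pvGrp b = g' := pv_bucketL_grp our migrated g' b hb
    unfold pvKey pvSortKey1 pvSortKey2
    rw [Prod.Lex.toLex_lt_toLex]
    rcases h with h | ⟨heq, hlt⟩
    · left; rw [hga, hgb]; exact h
    · right
      refine ⟨by rw [hga, hgb, heq], ?_⟩
      rw [Prod.Lex.toLex_lt_toLex]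
      left
      rw [hga, hgb]; exact hlt

-- ===== VERDICT (by name: the statement is the Claim_ definition above) =====
theorem merge_and_group_spec : Claim_equal_merge_and_group := by
  intro our migrated _
  unfold Spec_merge_and_group
  rw [pv_A_foldl, pv_B_foldl]
  have hperm := pv_L_perm our migrated
  have hsorted : PySem.List.sorted2 (pvMerge our migrated).keys pvSortKey1 pvSortKey2
      = pvL our migrated := by
    rw [pv_sorted2_eq_sorted]
    exact PySem.List.sorted_eq_of_perm_of_pairwise_lt _ _ _ hperm (pv_L_pairwise our migrated)
  rw [hsorted]
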